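-- pv_equiv track=rewrite | github.com/fadyNabil16/Kenken-Game | kenken.py | conflicting
-- ===== SOURCE A (Python) =====
-- def RowXorCol(xy1, xy2):
--     # return true if the two cells in the same raw or in the same column
--     return (xy1[0] == xy2[0]) != (xy1[1] == xy2[1])
--
-- def conflicting(A, a, B, b):
--
--     for i in range(len(A)):
--         for j in range(len(B)):
--             mA = A[i]
--             mB = B[j]
--
--             ma = a[i]
--             mb = b[j]
--             if RowXorCol(mA, mB) and ma == mb:
--                 """"
--                 if RowXorCol(mA, mB) evaluates to true and
--                 the value of mA in 'assignment' a is equal to the value of mb in 'assignment' b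
--
--                 """
--                 return True
--
--     return False
-- ===== SOURCE B (Python) =====
-- def conflicting(A, a, B, b):
--     # Index B's cells by (value, row) and by (value, col); each entry keeps the
--     # first other-coordinate seen and whether a second distinct one was seen.
--     by_row = {}
--     by_col = {}
--     for cell, v in zip(B, b):
--         r, c = cell[0], cell[1]
--         e = by_row.get((v, r))
--         if e is None:
--             by_row[(v, r)] = (c, False)
--         elif not e[1] and e[0] != c:
--             by_row[(v, r)] = (e[0], True)
--         e = by_col.get((v, c))
--         if e is None:
--             by_col[(v, c)] = (r, False)
--         elif not e[1] and e[0] != r: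
--             by_col[(v, c)] = (e[0], True)
--     for cell, v in zip(A, a):
--         r, c = cell[0], cell[1]
--         e = by_row.get((v, r))
--         if e is not None and (e[1] or e[0] != c):
--             return True
--         e = by_col.get((v, c))
--         if e is not None and (e[1] or e[0] != r):
--             return True
--     return False
-- ===== Notes on version B (the rewrite author's own statement) =====
-- stated objective: alternative
-- what changed: replaced the nested all-pairs scan over A×B by a single pass that indexes B's cells in two dicts keyed by (value,row) and (value,col) (each entry keeping the first other-coordinate and a 'saw a second distinct one' flag), then one lookup pass over A's cells; O(|A|+|B|) worst case vs A's O(|A|*|B|), though A's early exit makes the measured difference small on conflict-heavy inputs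
-- outside the precondition, e.g. on conflicting([], [], [(2,), (1,)], [-3, -2, -1, 165]): A returns False, B raises IndexError; on conflicting([(1, 1), (9,)], [5, 5], [(1, 2)], [5]): A returns True, B returns True
import Mathlib
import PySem

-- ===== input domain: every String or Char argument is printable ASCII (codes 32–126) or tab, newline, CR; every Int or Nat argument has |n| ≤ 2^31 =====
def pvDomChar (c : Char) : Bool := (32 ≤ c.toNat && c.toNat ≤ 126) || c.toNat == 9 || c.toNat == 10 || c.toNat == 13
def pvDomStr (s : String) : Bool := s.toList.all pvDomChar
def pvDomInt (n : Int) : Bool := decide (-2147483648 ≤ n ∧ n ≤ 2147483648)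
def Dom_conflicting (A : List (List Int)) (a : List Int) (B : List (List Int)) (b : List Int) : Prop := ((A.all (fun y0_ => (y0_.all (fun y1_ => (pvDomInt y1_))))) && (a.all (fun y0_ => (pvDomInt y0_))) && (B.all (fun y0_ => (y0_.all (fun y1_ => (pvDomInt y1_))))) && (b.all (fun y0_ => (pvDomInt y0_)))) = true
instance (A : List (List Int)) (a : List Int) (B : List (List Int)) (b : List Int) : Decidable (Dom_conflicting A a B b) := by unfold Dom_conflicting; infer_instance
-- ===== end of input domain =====

-- B replaces A's nested all-pairs scan by two dict indexes over B's cells plus one lookup pass over A's cells; return value only.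

-- ===== PORT A =====
def rowXorCol (xy1 xy2 : List Int) : Bool :=
  (PySem.List.pyGetD xy1 0 0 == PySem.List.pyGetD xy2 0 0) !=
  (PySem.List.pyGetD xy1 1 0 == PySem.List.pyGetD xy2 1 0)

def conflicting (A : List (List Int)) (a : List Int) (B : List (List Int)) (b : List Int) : Bool :=
  (PySem.List.pyRange 0 (A.length) 1).any (fun i =>
    (PySem.List.pyRange 0 (B.length) 1).any (fun j =>
      let mA := PySem.List.pyGetD A i []
      let mB := PySem.List.pyGetD B j []
      let ma := PySem.List.pyGetD a i 0
      let mb := PySem.List.pyGetD b j 0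
      rowXorCol mA mB && (ma == mb)))

-- ===== PORT B =====
-- dict-entry update: keep the first other-coordinate seen and whether a second distinct one was seen
def updEntry (d : PySem.Dict (Int × Int) (Int × Bool)) (k : Int × Int) (x : Int) :
    PySem.Dict (Int × Int) (Int × Bool) :=
  match d.get? k with
  | none => d.insert k (x, false)
  | some e => if !e.2 && e.1 != x then d.insert k (e.1, true) else d

def hitEntry (e : Option (Int × Bool)) (x : Int) : Bool :=
  match e with
  | none => false
  | some e => e.2 || e.1 != x

def conflicting_alt (A : List (List Int)) (a : List Int) (B : List (List Int)) (b : List Int) : Bool :=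
  let idx := (B.zip b).foldl
    (fun (d : PySem.Dict (Int × Int) (Int × Bool) × PySem.Dict (Int × Int) (Int × Bool)) p =>
      (updEntry d.1 (p.2, PySem.List.pyGetD p.1 0 0) (PySem.List.pyGetD p.1 1 0),
       updEntry d.2 (p.2, PySem.List.pyGetD p.1 1 0) (PySem.List.pyGetD p.1 0 0)))
    (PySem.Dict.empty, PySem.Dict.empty)
  (A.zip a).any (fun p =>
    hitEntry (idx.1.get? (p.2, PySem.List.pyGetD p.1 0 0)) (PySem.List.pyGetD p.1 1 0) ||
    hitEntry (idx.2.get? (p.2, PySem.List.pyGetD p.1 1 0)) (PySem.List.pyGetD p.1 0 0))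

-- ===== PRECONDITION & SPEC =====
-- Pre_ excludes malformed inputs (an assignment list shorter than its cell list, or a cell with
-- fewer than 2 coordinates), on which A usually raises IndexError; A may still return a value
-- there by exiting early before touching the malformed part — those returns are excluded too.
def Pre_conflicting (A : List (List Int)) (a : List Int) (B : List (List Int)) (b : List Int) : Prop :=
  A.length ≤ a.length ∧ B.length ≤ b.length ∧
  (∀ r ∈ A, 2 ≤ r.length) ∧ (∀ r ∈ B, 2 ≤ r.length)
instance (A : List (List Int)) (a : List Int) (B : List (List Int)) (b : List Int) : Decidable (Pre_conflicting A a B b) := by unfold Pre_conflicting; infer_instance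

def pvWitness_conflicting : List (List Int) × List Int × List (List Int) × List Int :=
  ([[1, 1], [2, 3]], [4, 5], [[1, 2], [0, 3]], [4, 7])

def Spec_conflicting (A : List (List Int)) (a : List Int) (B : List (List Int)) (b : List Int) (out : Bool) : Prop := out = conflicting_alt A a B b
instance (A : List (List Int)) (a : List Int) (B : List (List Int)) (b : List Int) (out : Bool) : Decidable (Spec_conflicting A a B b out) := by unfold Spec_conflicting; infer_instance

-- ===== CLAIM (what is proved, stated in full; the proofs are below) =====
def Claim_equal_conflicting : Prop := ∀ (A : List (List Int)) (a : List Int) (B : List (List Int)) (b : List Int), Dom_conflicting A a B b → Pre_conflicting A a B b → Spec_conflicting A a B b (conflicting A a B b)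

-- ===== LEMMAS AND PROOFS =====

-- entry produced by the build loop from the list M of other-coordinates matching a key
def entryOf : List Int → Option (Int × Bool)
  | [] => none
  | x :: xs => some (x, xs.any (fun y => y != x))

-- merging an existing entry with further matches
def combineE : Option (Int × Bool) → List Int → Option (Int × Bool)
  | none, M => entryOf M
  | some e, M => some (e.1, e.2 || M.any (fun y => y != e.1))

theorem combineE_nil (o : Option (Int × Bool)) : combineE o [] = o := by
  cases o <;> simp [combineE, entryOf]

theorem get?_updEntry_of_ne (d : PySem.Dict (Int × Int) (Int × Bool)) (k k' : Int × Int)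
    (x : Int) (h : k' ≠ k) : (updEntry d k x).get? k' = d.get? k' := by
  unfold updEntry
  rcases hd : d.get? k with _ | e
  · simp [PySem.Dict.get?_insert_of_ne _ _ h]
  · by_cases hc : (!e.2 && e.1 != x) = true <;>
      simp [hc, PySem.Dict.get?_insert_of_ne _ _ h]

theorem combineE_updEntry (d : PySem.Dict (Int × Int) (Int × Bool)) (k : Int × Int)
    (x : Int) (M : List Int) :
    combineE ((updEntry d k x).get? k) M = combineE (d.get? k) (x :: M) := by
  unfold updEntry
  cases hd : d.get? k with
  | none => simp [PySem.Dict.get?_insert_self, combineE, entryOf]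
  | some e =>
    obtain ⟨x0, m⟩ := e
    by_cases hm : m
    · subst hm; simp [combineE, hd]
    · simp only [Bool.not_eq_true] at hm; subst hm
      by_cases hx : x0 = x
      · subst hx; simp [combineE, hd]
      · simp [hx, PySem.Dict.get?_insert_self, combineE, bne_iff_ne, Ne.symm hx]

theorem get?_build (kf : List Int × Int → Int × Int) (xf : List Int × Int → Int)
    (L : List (List Int × Int)) (d : PySem.Dict (Int × Int) (Int × Bool)) (k : Int × Int) :
    (L.foldl (fun d p => updEntry d (kf p) (xf p)) d).get? k
      = combineE (d.get? k) ((L.filter (fun p => kf p == k)).map xf) := by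
  induction L generalizing d with
  | nil => simp [combineE_nil]
  | cons p L ih =>
    simp only [List.foldl_cons, List.filter_cons]
    by_cases hk : kf p = k
    · simp only [hk, beq_self_eq_true, if_pos, List.map_cons]
      rw [ih, ← hk, combineE_updEntry, hk]
    · have : (kf p == k) = false := beq_eq_false_iff_ne.mpr hk
      simp only [this, Bool.false_eq_true, if_neg, not_false_iff]
      rw [ih, get?_updEntry_of_ne _ _ _ _ (Ne.symm hk)]

theorem hitEntry_entryOf (M : List Int) (c : Int) :
    hitEntry (entryOf M) c = M.any (fun y => y != c) := by
  cases M with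
  | nil => rfl
  | cons x xs =>
    simp only [entryOf, hitEntry, List.any_cons]
    apply Bool.eq_iff_iff.mpr
    by_cases hx : x = c
    · subst hx; simp
    · simp [bne_iff_ne, hx]

-- the per-pair conflict condition, phrased as B's port tests it
def pairHit (p q : List Int × Int) : Bool :=
  ((q.2 == p.2 && (PySem.List.pyGetD q.1 0 0 == PySem.List.pyGetD p.1 0 0))
      && (PySem.List.pyGetD q.1 1 0 != PySem.List.pyGetD p.1 1 0))
  || ((q.2 == p.2 && (PySem.List.pyGetD q.1 1 0 == PySem.List.pyGetD p.1 1 0))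
      && (PySem.List.pyGetD q.1 0 0 != PySem.List.pyGetD p.1 0 0))

theorem cond_iff (cA cB : List Int) (va vb : Int) :
    (rowXorCol cA cB && (va == vb)) = pairHit (cA, va) (cB, vb) := by
  unfold rowXorCol pairHit
  generalize PySem.List.pyGetD cA 0 0 = x1
  generalize PySem.List.pyGetD cB 0 0 = x2
  generalize PySem.List.pyGetD cA 1 0 = y1
  generalize PySem.List.pyGetD cB 1 0 = y2
  simp only [Bool.beq_eq_decide_eq, bne]
  by_cases h1 : x1 = x2 <;> by_cases h2 : y1 = y2 <;> by_cases h3 : va = vb <;>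
    simp [h1, h2, h3, eq_comm]

theorem foldl_pair_split (L : List (List Int × Int))
    (d1 d2 : PySem.Dict (Int × Int) (Int × Bool)) :
    L.foldl (fun d p =>
        (updEntry d.1 (p.2, PySem.List.pyGetD p.1 0 0) (PySem.List.pyGetD p.1 1 0),
         updEntry d.2 (p.2, PySem.List.pyGetD p.1 1 0) (PySem.List.pyGetD p.1 0 0))) (d1, d2)
      = (L.foldl (fun d p => updEntry d (p.2, PySem.List.pyGetD p.1 0 0) (PySem.List.pyGetD p.1 1 0)) d1,
         L.foldl (fun d p => updEntry d (p.2, PySem.List.pyGetD p.1 1 0) (PySem.List.pyGetD p.1 0 0)) d2) :=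
  PySem.List.foldl_prod_mk
    (fun x (p : List Int × Int) => updEntry x (p.2, PySem.List.pyGetD p.1 0 0) (PySem.List.pyGetD p.1 1 0))
    (fun x (p : List Int × Int) => updEntry x (p.2, PySem.List.pyGetD p.1 1 0) (PySem.List.pyGetD p.1 0 0))
    L d1 d2

theorem alt_eq (A : List (List Int)) (a : List Int) (B : List (List Int)) (b : List Int) :
    conflicting_alt A a B b = (A.zip a).any (fun p => (B.zip b).any (fun q => pairHit p q)) := by
  unfold conflicting_alt
  simp only [foldl_pair_split]
  refine List.any_congr rfl ?_
  intro p
  rw [get?_build (fun q => (q.2, PySem.List.pyGetD q.1 0 0)) (fun q => PySem.List.pyGetD q.1 1 0),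
      get?_build (fun q => (q.2, PySem.List.pyGetD q.1 1 0)) (fun q => PySem.List.pyGetD q.1 0 0)]
  simp only [PySem.Dict.get?_empty, combineE]
  rw [hitEntry_entryOf, hitEntry_entryOf, List.any_map, List.any_map, List.any_filter, List.any_filter]
  apply Bool.eq_iff_iff.mpr
  simp only [Bool.or_eq_true, List.any_eq_true, Function.comp, pairHit, Bool.and_eq_true,
    beq_iff_eq, bne_iff_ne, Prod.ext_iff]
  constructor
  · rintro (⟨q, hq, ⟨hv, h0⟩, h1⟩ | ⟨q, hq, ⟨hv, h1⟩, h0⟩)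
    · exact ⟨q, hq, Or.inl ⟨⟨hv, h0⟩, h1⟩⟩
    · exact ⟨q, hq, Or.inr ⟨⟨hv, h1⟩, h0⟩⟩
  · rintro ⟨q, hq, ⟨⟨hv, h0⟩, h1⟩ | ⟨⟨hv, h1⟩, h0⟩⟩
    · exact Or.inl ⟨q, hq, ⟨hv, h0⟩, h1⟩
    · exact Or.inr ⟨q, hq, ⟨hv, h1⟩, h0⟩

theorem conflicting_spec : Claim_equal_conflicting := by
  intro A a B b _ hpre
  obtain ⟨hla, hlb, _, _⟩ := hpre
  unfold Spec_conflicting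
  rw [alt_eq]
  apply Bool.eq_iff_iff.mpr
  unfold conflicting
  simp only [List.any_eq_true, PySem.List.mem_pyRange_one]
  have hza : (A.zip a).length = A.length := by
    rw [List.length_zip]; omega
  have hzb : (B.zip b).length = B.length := by
    rw [List.length_zip]; omega
  constructor
  · rintro ⟨i, ⟨hi0, hi1⟩, j, ⟨hj0, hj1⟩, hc⟩
    have hiN : i.toNat < A.length := by omega
    have hjN : j.toNat < B.length := by omega
    refine ⟨(A.zip a)[i.toNat]'(by omega), List.getElem_mem _, (B.zip b)[j.toNat]'(by omega),
      List.getElem_mem _, ?_⟩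
    rw [List.getElem_zip, List.getElem_zip, ← cond_iff]
    rw [PySem.List.pyGetD_eq_getElem A [] hi0 (by exact_mod_cast hi1),
        PySem.List.pyGetD_eq_getElem B [] hj0 (by exact_mod_cast hj1),
        PySem.List.pyGetD_eq_getElem a 0 hi0 (by omega),
        PySem.List.pyGetD_eq_getElem b 0 hj0 (by omega)] at hc
    exact hc
  · rintro ⟨p, hp, q, hq, hc⟩
    obtain ⟨i, hi, hip⟩ := List.mem_iff_getElem.mp hp
    obtain ⟨j, hj, hjq⟩ := List.mem_iff_getElem.mp hq
    refine ⟨(i : Int), ⟨by omega, by rw [hza] at hi; exact_mod_cast hi⟩,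
            (j : Int), ⟨by omega, by rw [hzb] at hj; exact_mod_cast hj⟩, ?_⟩
    rw [List.getElem_zip] at hip
    rw [List.getElem_zip] at hjq
    rw [PySem.List.pyGetD_eq_getElem A [] (by omega) (by rw [hza] at hi; exact_mod_cast hi),
        PySem.List.pyGetD_eq_getElem B [] (by omega) (by rw [hzb] at hj; exact_mod_cast hj),
        PySem.List.pyGetD_eq_getElem a 0 (by omega) (by rw [hza] at hi; omega),
        PySem.List.pyGetD_eq_getElem b 0 (by omega) (by rw [hzb] at hj; omega)]
    simp only [Int.toNat_natCast]
    rw [cond_iff, hip, hjq]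
    exact hc
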